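-- pv_equiv track=rewrite | github.com/AnRi1202/algorithm | week2/2-b2.py | seq_prime_all
-- ===== SOURCE A (Python) =====
-- def seq_prime_all(n):
--   seq_prime_all_List = [0] * (n+1)
--   is_prime=[True]*(n+1)
--   i=2
--   while(i*i<=n):
--     if(is_prime[i]):
--       j=i*i
--       while(j<=n):
--         is_prime[j]=False
--         j+=i
--     i+=1
--   sum = 0
--   for i in range(3,n+1):
--     if is_prime[i] and is_prime[(i+1)//2]:
--       sum+=1
--     seq_prime_all_List[i]= sum
--   return seq_prime_all_List
-- ===== SOURCE B (Python) =====
-- def seq_prime_all(n):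
--   def is_prime(x):
--     if x < 2:
--       return False
--     d = 2
--     while d * d <= x:
--       if x % d == 0:
--         return False
--       d += 1
--     return True
--   out = [0] * min(3, n + 1)
--   s = 0
--   for i in range(3, n + 1):
--     if is_prime(i) and is_prime((i + 1) // 2):
--       s += 1
--     out.append(s)
--   return out
-- ===== Notes on version B (the rewrite author's own statement) =====
-- stated objective: simpler
-- what changed: B drops A's Eratosthenes sieve array entirely, testing each i (and (i+1)//2) with a trial-division is_prime helper instead, and appends to the result list instead of writing into a pre-allocated zero array.
import Mathlib
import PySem

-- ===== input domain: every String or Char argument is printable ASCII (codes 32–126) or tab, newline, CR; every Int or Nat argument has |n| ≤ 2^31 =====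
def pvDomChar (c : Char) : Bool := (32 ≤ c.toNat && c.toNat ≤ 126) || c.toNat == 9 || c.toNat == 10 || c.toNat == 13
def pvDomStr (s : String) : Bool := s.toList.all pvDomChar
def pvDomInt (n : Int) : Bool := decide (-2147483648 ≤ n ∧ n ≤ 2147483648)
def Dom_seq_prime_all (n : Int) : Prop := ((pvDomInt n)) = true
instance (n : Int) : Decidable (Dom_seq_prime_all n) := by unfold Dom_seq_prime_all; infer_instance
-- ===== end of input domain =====

-- B replaces A's sieve array with a trial-division primality helper and appends to the
-- result instead of writing into a pre-allocated array (objective: simpler).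

-- ===== PORT A =====
-- inner while of the sieve: mark j, j+i, j+2i, … ≤ n as composite.
-- the '1 ≤ i' conjunct is a totality guard only (always true at the call site, where 2 ≤ i).
def pvMark (n : Int) (l : List Bool) (j i : Int) : List Bool :=
  if _h : j ≤ n ∧ 1 ≤ i then pvMark n (l.set j.toNat false) (j + i) i else l
  termination_by (n + 1 - j).toNat
  decreasing_by omega

-- outer while of the sieve.  'l.getD i.toNat true' is Python's 'is_prime[i]', exact here
-- because 0 ≤ i ≤ n < len(is_prime) whenever it is evaluated.
def pvSieve (n : Int) (l : List Bool) (i : Int) : List Bool :=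
  if _h : i * i ≤ n then
    pvSieve n (if l.getD i.toNat true then pvMark n l (i * i) i else l) (i + 1)
  else l
  termination_by (n + 1 - i).toNat
  decreasing_by
    have h0 : 0 ≤ i * i := mul_self_nonneg i
    have hin : i ≤ n := by
      rcases le_total i 0 with hi | hi
      · exact le_trans hi (le_trans h0 _h)
      · rcases hi.lt_or_eq with h1 | h1
        · exact le_trans (le_mul_of_one_le_left hi (by omega)) _h
        · omega
    omega

def seq_prime_all (n : Int) : List Int :=
  let res0 : List Int := List.replicate (n + 1).toNat 0
  let isp : List Bool := pvSieve n (List.replicate (n + 1).toNat true) 2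
  -- list indexing in the final loop is exact via getD: every index is in range (3 ≤ i ≤ n, 2 ≤ (i+1)//2 ≤ n)
  ((PySem.List.pyRange 3 (n + 1) 1).foldl
    (fun (st : List Int × Int) i =>
      let s := if isp.getD i.toNat true && isp.getD (PySem.Int.floordiv (i + 1) 2).toNat true
               then st.2 + 1 else st.2
      (st.1.set i.toNat s, s))
    (res0, 0)).1

-- ===== PORT B =====
-- trial-division loop of Source B's is_prime
def pvTrial (x d : Int) : Bool :=
  if _h : d * d ≤ x then
    (if PySem.Int.mod x d == 0 then false else pvTrial x (d + 1))
  else true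
  termination_by (x + 1 - d).toNat
  decreasing_by
    have h0 : 0 ≤ d * d := mul_self_nonneg d
    have hdx : d ≤ x := by
      rcases le_total d 0 with hd | hd
      · exact le_trans hd (le_trans h0 _h)
      · rcases hd.lt_or_eq with h1 | h1
        · exact le_trans (le_mul_of_one_le_left hd (by omega)) _h
        · omega
    omega

def pvIsPrime (x : Int) : Bool := if x < 2 then false else pvTrial x 2

def seq_prime_all_alt (n : Int) : List Int :=
  ((PySem.List.pyRange 3 (n + 1) 1).foldl
    (fun (st : List Int × Int) i =>
      let s := if pvIsPrime i && pvIsPrime (PySem.Int.floordiv (i + 1) 2)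
               then st.2 + 1 else st.2
      (st.1 ++ [s], s))
    (List.replicate (min 3 (n + 1)).toNat 0, 0)).1

-- ===== PRECONDITION & SPEC =====
def Spec_seq_prime_all (n : Int) (out : List Int) : Prop := out = seq_prime_all_alt n
instance (n : Int) (out : List Int) : Decidable (Spec_seq_prime_all n out) := by unfold Spec_seq_prime_all; infer_instance

-- ===== CLAIM (what is proved, stated in full; the proofs are below) =====
def Claim_equal_seq_prime_all : Prop := ∀ (n : Int), Dom_seq_prime_all n → Spec_seq_prime_all n (seq_prime_all n)

-- ===== LEMMAS AND PROOFS =====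
theorem pvMark_length (n : Int) (l : List Bool) (j i : Int) :
    (pvMark n l j i).length = l.length := by
  fun_induction pvMark n l j i with
  | case1 l j _h ih => simpa using ih
  | case2 => rfl

theorem pvMark_getD (n i : Int) (hi : 1 ≤ i) (m : Nat) (j : Int) (l : List Bool)
    (hj : 0 ≤ j) (hl : l.length = (n + 1).toNat) :
    ((pvMark n l j i).getD m true = true ↔
      (¬(j ≤ (m : Int) ∧ (m : Int) ≤ n ∧ i ∣ ((m : Int) - j)) ∧ l.getD m true = true)) := by
  revert hj hl
  fun_induction pvMark n l j i with
  | case1 l j _h ih =>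
    intro hj hl
    rw [ih (by omega) (by simpa using hl)]
    by_cases hm : (m : Int) = j
    · have hmj : m = j.toNat := by omega
      have hmlt : m < l.length := by omega
      have hfalse : (l.set j.toNat false).getD m true = false := by
        rw [List.getD_eq_getElem?_getD, hmj, List.getElem?_set_self (by omega)]
        rfl
      simp only [hfalse]
      constructor
      · rintro ⟨-, h⟩; exact absurd h (by simp)
      · rintro ⟨hC, -⟩
        exact absurd ⟨by omega, by omega, by rw [hm]; simp⟩ hC
    · have hne : (l.set j.toNat false).getD m true = l.getD m true := by
        rw [List.getD_eq_getElem?_getD, List.getD_eq_getElem?_getD,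
          List.getElem?_set_ne (by omega)]
      rw [hne]
      have hC : (j + i ≤ (m : Int) ∧ (m : Int) ≤ n ∧ i ∣ ((m : Int) - (j + i))) ↔
          (j ≤ (m : Int) ∧ (m : Int) ≤ n ∧ i ∣ ((m : Int) - j)) := by
        constructor
        · rintro ⟨h1, h2, h3⟩
          refine ⟨by omega, h2, ?_⟩
          have e : (m : Int) - j = ((m : Int) - (j + i)) + i := by ring
          rw [e]; exact dvd_add h3 (dvd_refl i)
        · rintro ⟨h1, h2, h3⟩
          have hpos : 0 < (m : Int) - j := by omega
          have hle := Int.le_of_dvd hpos h3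
          refine ⟨by omega, h2, ?_⟩
          rw [← sub_sub]; exact dvd_sub h3 (dvd_refl i)
      rw [hC]
  | case2 l j _h =>
    intro hj hl
    have hnj : n < j := by
      by_contra h; exact _h ⟨by omega, hi⟩
    have : ¬(j ≤ (m : Int) ∧ (m : Int) ≤ n ∧ i ∣ ((m : Int) - j)) := by
      rintro ⟨h1, h2, -⟩; omega
    simp [this]
theorem pvSieve_char (n i : Int) (l : List Bool) (hi : 2 ≤ i)
    (hl : l.length = (n + 1).toNat)
    (inv : ∀ m : Nat, (m : Int) ≤ n →
      (l.getD m true = true ↔ ¬∃ d : Int, 2 ≤ d ∧ d < i ∧ d * d ≤ (m : Int) ∧ d ∣ (m : Int))) :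
    ∀ m : Nat, (m : Int) ≤ n →
      ((pvSieve n l i).getD m true = true ↔
        ¬∃ d : Int, 2 ≤ d ∧ d * d ≤ (m : Int) ∧ d ∣ (m : Int)) := by
  revert hi hl inv
  fun_induction pvSieve n l i with
  | case1 l i _h ih =>
    intro hi hl inv
    have hiin : i ≤ n := le_trans (le_mul_of_one_le_left (by omega) (by omega)) _h
    have hicast : ((i.toNat : Int)) = i := by omega
    -- the d = i disjunct: splitting the "< i + 1" bound
    have hsplit : ∀ m : Nat, (∃ d : Int, 2 ≤ d ∧ d < i + 1 ∧ d * d ≤ (m : Int) ∧ d ∣ (m : Int)) ↔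
        ((∃ d : Int, 2 ≤ d ∧ d < i ∧ d * d ≤ (m : Int) ∧ d ∣ (m : Int)) ∨
          (i * i ≤ (m : Int) ∧ i ∣ (m : Int))) := by
      intro m
      constructor
      · rintro ⟨d, h1, h2, h3, h4⟩
        rcases eq_or_lt_of_le (show d ≤ i by omega) with rfl | hlt
        · exact Or.inr ⟨h3, h4⟩
        · exact Or.inl ⟨d, h1, by omega, h3, h4⟩
      · rintro (⟨d, h1, h2, h3, h4⟩ | ⟨h3, h4⟩)
        · exact ⟨d, h1, by omega, h3, h4⟩
        · exact ⟨i, hi, by omega, h3, h4⟩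
    split
    case isTrue htrue =>
      -- is_prime[i] was still true: mark all multiples of i from i*i
      rw [dif_pos htrue] at ih
      apply ih (by omega) (by rw [pvMark_length]; exact hl)
      intro m hm
      rw [pvMark_getD n i (by omega) m (i * i) l (by positivity) hl]
      rw [inv m hm, hsplit m]
      have hdvd : ∀ (h4 : i ∣ (m : Int)), (i ∣ (m : Int) - i * i) := by
        intro h4; exact dvd_sub h4 (Dvd.intro i rfl)
      constructor
      · rintro ⟨hnc, hno⟩
        rintro (h | ⟨h3, h4⟩)
        · exact hno h
        · exact hnc ⟨h3, hm, hdvd h4⟩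
      · intro hnone
        refine ⟨?_, fun h => hnone (Or.inl h)⟩
        rintro ⟨h1, h2, h3⟩
        have h4 : i ∣ (m : Int) := by
          have e : (m : Int) = ((m : Int) - i * i) + i * i := by ring
          rw [e]; exact dvd_add h3 (Dvd.intro i rfl)
        exact hnone (Or.inr ⟨h1, h4⟩)
    case isFalse hfalse =>
      -- is_prime[i] already false: i is composite, its multiples are covered by a smaller divisor
      rw [dif_neg hfalse] at ih
      apply ih (by omega) hl
      intro m hm
      rw [inv m hm, hsplit m]
      have hcomp : ∃ d : Int, 2 ≤ d ∧ d < i ∧ d * d ≤ i ∧ d ∣ i := by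
        by_contra hno
        apply hfalse
        have h2 := inv i.toNat (by omega)
        rw [hicast] at h2
        exact h2.mpr hno
      constructor
      · intro hno
        rintro (h | ⟨h3, h4⟩)
        · exact hno h
        · obtain ⟨d, a, b, c, dd⟩ := hcomp
          exact hno ⟨d, a, b, le_trans c (by nlinarith), dd.trans h4⟩
      · exact fun hno h => hno (Or.inl h)
  | case2 l i _h =>
    intro hi hl inv m hm
    rw [inv m hm]
    constructor
    · intro hno
      rintro ⟨d, h1, h2, h3⟩
      refine hno ⟨d, h1, ?_, h2, h3⟩
      by_contra hd
      have : i ≤ d := by omega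
      have : i * i ≤ d * d := mul_le_mul this this (by omega) (by omega)
      omega
    · rintro hno ⟨d, h1, h2, h3, h4⟩
      exact hno ⟨d, h1, h3, h4⟩
theorem pvTrial_char (x d : Int) (hd : 0 ≤ d) :
    (pvTrial x d = true ↔ ∀ e : Int, d ≤ e → e * e ≤ x → ¬ e ∣ x) := by
  revert hd
  fun_induction pvTrial x d with
  | case1 d _h hmod =>
    intro hd
    -- x % d == 0 : d divides x, the loop returns False
    have hdvd : d ∣ x := by
      rw [← PySem.Int.mod_eq_zero_iff_dvd]
      simpa using hmod
    simp only [show (false = true) ↔ False by simp, false_iff]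
    intro hall
    exact hall d le_rfl _h hdvd
  | case2 d _h hmod ih =>
    intro hd
    rw [ih (by omega)]
    have hndvd : ¬ d ∣ x := by
      rw [← PySem.Int.mod_eq_zero_iff_dvd]
      simpa using hmod
    constructor
    · intro hall e he h2 h3
      rcases eq_or_lt_of_le he with rfl | hlt
      · exact hndvd h3
      · exact hall e (by omega) h2 h3
    · intro hall e he h2 h3
      exact hall e (by omega) h2 h3
  | case3 d _h =>
    intro hd
    simp only [true_iff]
    intro e he h2 h3
    have : d * d ≤ e * e := mul_le_mul he he hd (by omega)
    omega
theorem pvBridge (n : Int) (m : Nat) (h2 : 2 ≤ (m : Int)) (hmn : (m : Int) ≤ n) :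
    (pvSieve n (List.replicate (n + 1).toNat true) 2).getD m true = pvIsPrime (m : Int) := by
  have hrep : ∀ k : Nat, (List.replicate (n + 1).toNat true).getD k true = true := by
    intro k
    rw [List.getD_eq_getElem?_getD, List.getElem?_replicate]
    split <;> rfl
  have hchar := pvSieve_char n 2 (List.replicate (n + 1).toNat true) le_rfl
    (by simp) (fun k hk => by simp; omega) m hmn
  have hprime : pvIsPrime (m : Int) = true ↔ ∀ e : Int, 2 ≤ e → e * e ≤ (m : Int) → ¬ e ∣ (m : Int) := by
    rw [pvIsPrime, if_neg (by omega)]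
    exact pvTrial_char (m : Int) 2 (by omega)
  rw [Bool.eq_iff_iff, hchar, hprime]
  constructor
  · intro h e he1 he2 he3
    exact h ⟨e, he1, he2, he3⟩
  · rintro h ⟨e, he1, he2, he3⟩
    exact h e he1 he2 he3
theorem pvAppendFold (u : Int → Int → Int) : ∀ (r : List Int) (acc : List Int) (s : Int),
    r.foldl (fun (st : List Int × Int) i => (st.1 ++ [u st.2 i], u st.2 i)) (acc, s)
      = (acc ++ (r.foldl (fun (st : List Int × Int) i => (st.1 ++ [u st.2 i], u st.2 i)) ([], s)).1,
         (r.foldl (fun (st : List Int × Int) i => (st.1 ++ [u st.2 i], u st.2 i)) ([], s)).2) := by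
  intro r
  induction r with
  | nil => intro acc s; simp
  | cons a t ih =>
    intro acc s
    simp only [List.foldl_cons]
    rw [ih (acc ++ [u s a]) (u s a), ih ([] ++ [u s a]) (u s a)]
    simp

theorem pvSetFold (n : Int) (u : Int → Int → Int) : ∀ (k : Nat) (a : Int) (l : List Int) (s : Int),
    (n + 1 - a).toNat = k → 3 ≤ a → l.length = (n + 1).toNat →
    (PySem.List.pyRange a (n + 1) 1).foldl
        (fun (st : List Int × Int) i => (st.1.set i.toNat (u st.2 i), u st.2 i)) (l, s)
      = (l.take a.toNat ++
          ((PySem.List.pyRange a (n + 1) 1).foldl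
            (fun (st : List Int × Int) i => (st.1 ++ [u st.2 i], u st.2 i)) ([], s)).1,
         ((PySem.List.pyRange a (n + 1) 1).foldl
            (fun (st : List Int × Int) i => (st.1 ++ [u st.2 i], u st.2 i)) ([], s)).2) := by
  intro k
  induction k with
  | zero =>
    intro a l s hk ha hl
    rw [PySem.List.pyRange_one_eq_nil (by omega)]
    simp [List.take_of_length_le (by omega : l.length ≤ a.toNat)]
  | succ k ih =>
    intro a l s hk ha hl
    rw [PySem.List.pyRange_one_cons (by omega)]
    simp only [List.foldl_cons]
    rw [ih (a + 1) (l.set a.toNat (u s a)) (u s a) (by omega) (by omega) (by simpa using hl)]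
    rw [pvAppendFold u _ ([] ++ [u s a]) (u s a)]
    have htake : (l.set a.toNat (u s a)).take (a + 1).toNat = l.take a.toNat ++ [u s a] := by
      have hlt : a.toNat < l.length := by omega
      have h1 : (a + 1).toNat = a.toNat + 1 := by omega
      have e1 : (l.set a.toNat (u s a)).take a.toNat = l.take a.toNat := by
        rw [List.set_eq_take_append_cons_drop, if_pos hlt]
        rw [List.take_append_of_le_length (by simp [Nat.min_eq_left hlt.le])]
        simp [List.take_take]
      rw [h1, List.take_add_one, List.getElem?_set_self hlt, e1]
      simp
    rw [htake]
    simp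
def pvU (s i : Int) : Int :=
  if pvIsPrime i && pvIsPrime (PySem.Int.floordiv (i + 1) 2) then s + 1 else s

theorem pvBits (n x : Int) (hx : 3 ≤ x ∧ x < n + 1) :
    ((pvSieve n (List.replicate (n + 1).toNat true) 2).getD x.toNat true = pvIsPrime x) ∧
    ((pvSieve n (List.replicate (n + 1).toNat true) 2).getD
        (PySem.Int.floordiv (x + 1) 2).toNat true = pvIsPrime (PySem.Int.floordiv (x + 1) 2)) := by
  have hxcast : ((x.toNat : Int)) = x := by omega
  have hq1 : 2 ≤ PySem.Int.floordiv (x + 1) 2 := by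
    rw [PySem.Int.le_floordiv_iff_mul_le (by omega)]; omega
  have hq2 : PySem.Int.floordiv (x + 1) 2 < x := by
    rw [PySem.Int.floordiv_lt_iff_lt_mul (by omega)]; omega
  have hqcast : (((PySem.Int.floordiv (x + 1) 2).toNat : Int)) = PySem.Int.floordiv (x + 1) 2 := by
    omega
  constructor
  · rw [pvBridge n x.toNat (by omega) (by omega), hxcast]
  · rw [pvBridge n (PySem.Int.floordiv (x + 1) 2).toNat (by omega) (by omega), hqcast]

theorem pv_main (n : Int) : seq_prime_all n = seq_prime_all_alt n := by
  simp only [seq_prime_all, seq_prime_all_alt]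
  rw [PySem.List.foldl_congr_mem
    (l := PySem.List.pyRange 3 (n + 1) 1)
    (init := (List.replicate (n + 1).toNat (0 : Int), (0 : Int)))
    (f := fun (st : List Int × Int) i =>
      (st.1.set i.toNat
        (if ((pvSieve n (List.replicate (n + 1).toNat true) 2).getD i.toNat true &&
            (pvSieve n (List.replicate (n + 1).toNat true) 2).getD
              (PySem.Int.floordiv (i + 1) 2).toNat true)
         then st.2 + 1 else st.2),
       if ((pvSieve n (List.replicate (n + 1).toNat true) 2).getD i.toNat true &&
            (pvSieve n (List.replicate (n + 1).toNat true) 2).getD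
              (PySem.Int.floordiv (i + 1) 2).toNat true)
       then st.2 + 1 else st.2))
    (g := fun (st : List Int × Int) i => (st.1.set i.toNat (pvU st.2 i), pvU st.2 i))
    (by
      intro acc x hx
      rw [PySem.List.mem_pyRange_one] at hx
      obtain ⟨hb1, hb2⟩ := pvBits n x hx
      simp only [hb1, hb2, pvU])]
  rw [pvSetFold n pvU (n + 1 - 3).toNat 3 (List.replicate (n + 1).toNat 0) 0 rfl le_rfl
    (by simp)]
  rw [show (fun (st : List Int × Int) i =>
      (st.1 ++ [if (pvIsPrime i && pvIsPrime (PySem.Int.floordiv (i + 1) 2)) then st.2 + 1 else st.2],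
       if (pvIsPrime i && pvIsPrime (PySem.Int.floordiv (i + 1) 2)) then st.2 + 1 else st.2))
    = (fun (st : List Int × Int) i => (st.1 ++ [pvU st.2 i], pvU st.2 i)) from rfl]
  rw [pvAppendFold pvU (PySem.List.pyRange 3 (n + 1) 1) (List.replicate (min 3 (n + 1)).toNat 0) 0]
  simp only [List.take_replicate]
  have : min (3 : Int).toNat (n + 1).toNat = (min 3 (n + 1)).toNat := by omega
  rw [this]

-- ===== VERDICT (by name: the statement is the Claim_ definition above) =====
theorem seq_prime_all_spec : Claim_equal_seq_prime_all := by
  intro n _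
  exact pv_main n
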